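-- pv_equiv track=rewrite | github.com/wzygxr/shuati | class026_BinarySearch/BinarySearchProblems.py | angry_cows
-- ===== SOURCE A (Python) =====
-- def angry_cows(haybales):
--     """
--     USACO: 愤怒的奶牛
--     题目来源: http://www.usaco.org/index.php?page=viewproblem2&cpid=592
--
--     题目描述:
--     在一个一维的场地中放置了若干堆干草，奶牛被点燃后会向左右两个方向传播爆炸。
--     爆炸的传播速度是每秒1单位距离。求最小的爆炸半径R，使得点燃任意一个干草堆都能引爆所有干草堆。
--
--     思路分析:
--     1. 二分答案法：半径范围在[0, maxPosition - minPosition]之间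
--     2. 对于每个候选半径mid，检查是否能通过点燃一个点引爆所有点
--     3. 贪心验证：从最左边开始，每次尽可能远地放置引爆点
--
--     时间复杂度: O(n log(maxDistance))
--     空间复杂度: O(1)
--     是否最优解: 是
--
--     :param haybales: 干草堆的位置数组
--     :return: 最小爆炸半径
--     """
--     haybales.sort()
--     left, right = 0, haybales[-1] - haybales[0]
--
--     def can_explode_all(radius):
--         count = 1
--         last_pos = haybales[0]
--         for i in range(1, len(haybales)):
--             if haybales[i] - last_pos > 2 * radius:
--                 count += 1
--                 last_pos = haybales[i]
--         return count <= 1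
--
--     while left < right:
--         mid = left + ((right - left) >> 1)
--         if can_explode_all(mid):
--             right = mid
--         else:
--             left = mid + 1
--
--     return left
-- ===== SOURCE B (Python) =====
-- def angry_cows(haybales):
--     # A's greedy check only moves last_pos at a split, so a radius r works
--     # iff max(haybales) - min(haybales) <= 2*r; the minimal such r is the
--     # ceiling of half the span.  (Return value only: A sorts its argument
--     # in place, B does not.)
--     return (max(haybales) - min(haybales) + 1) // 2
-- ===== Notes on version B (the rewrite author's own statement) =====
-- stated objective: faster
-- what changed: Replaced sort + binary search over the radius (whose greedy check reduces to 'span <= 2r') by the closed form (max-min+1)//2 in one pass; B does not mutate the input list.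
import Mathlib
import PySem

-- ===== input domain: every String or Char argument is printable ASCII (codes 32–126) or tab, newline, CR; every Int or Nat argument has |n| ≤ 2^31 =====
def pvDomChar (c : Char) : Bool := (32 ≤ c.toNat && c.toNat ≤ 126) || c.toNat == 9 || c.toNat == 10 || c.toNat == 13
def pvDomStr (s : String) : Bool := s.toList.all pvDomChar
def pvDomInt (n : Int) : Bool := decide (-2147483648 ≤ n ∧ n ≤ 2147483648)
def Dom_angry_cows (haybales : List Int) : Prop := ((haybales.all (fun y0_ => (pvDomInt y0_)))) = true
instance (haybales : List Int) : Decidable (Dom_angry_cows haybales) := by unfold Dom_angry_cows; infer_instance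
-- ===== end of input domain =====

-- B replaces A's sort + binary search by the closed form (max-min+1)//2.
-- Return value only: Python A sorts its argument in place, B does not.

-- ===== PORT A =====
-- can_explode_all(radius): count/last_pos loop over indices 1..len-1
def acCheck (s : List Int) (radius : Int) : Bool :=
  decide ((((PySem.List.pyRange 1 (s.length : Int) 1).foldl
    (fun (st : Int × Int) i =>
      if PySem.List.pyGetD s i 0 - st.2 > 2 * radius then (st.1 + 1, PySem.List.pyGetD s i 0)
      else st)
    (1, PySem.List.pyGetD s 0 0))).1 ≤ 1)

-- the while left < right loop; fuel only makes the recursion structural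
-- (each iteration shrinks right-left, so (right-left).toNat + 1 steps always suffice)
def acLoop (s : List Int) (fuel : Nat) (left right : Int) : Int :=
  match fuel with
  | 0 => left
  | fuel + 1 =>
    if left < right then
      let mid := left + PySem.Int.floordiv (right - left) 2
      if acCheck s mid then acLoop s fuel left mid else acLoop s fuel (mid + 1) right
    else left

def angry_cows (haybales : List Int) : Int :=
  let s := PySem.List.sorted haybales (fun x => x) false
  let right := PySem.List.pyGetD s (-1) 0 - PySem.List.pyGetD s 0 0
  acLoop s ((right - 0).toNat + 1) 0 right

-- ===== PORT B =====
def angry_cows_alt (haybales : List Int) : Int :=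
  PySem.Int.floordiv
    ((PySem.List.max? haybales (fun x => x)).getD 0
      - (PySem.List.min? haybales (fun x => x)).getD 0 + 1) 2

-- ===== PRECONDITION & SPEC =====
-- Pre_ excludes exactly the empty list, on which A raises IndexError (haybales[-1]).
def Pre_angry_cows (haybales : List Int) : Prop := haybales ≠ []
instance (haybales : List Int) : Decidable (Pre_angry_cows haybales) := by
  unfold Pre_angry_cows; infer_instance
def pvWitness_angry_cows : List Int := [3, 0, 10]

def Spec_angry_cows (haybales : List Int) (out : Int) : Prop := out = angry_cows_alt haybales
instance (haybales : List Int) (out : Int) : Decidable (Spec_angry_cows haybales out) := by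
  unfold Spec_angry_cows; infer_instance

-- ===== CLAIM (what is proved, stated in full; the proofs are below) =====
def Claim_equal_angry_cows : Prop := ∀ (haybales : List Int), Dom_angry_cows haybales → Pre_angry_cows haybales → Spec_angry_cows haybales (angry_cows haybales)

-- ===== LEMMAS AND PROOFS =====

-- the count component of the fold state never decreases
theorem acFold_mono (t : List Int) (r : Int) (st : Int × Int) :
    st.1 ≤ (t.foldl
      (fun (st : Int × Int) x => if x - st.2 > 2 * r then (st.1 + 1, x) else st) st).1 := by
  induction t generalizing st with
  | nil => exact le_refl _
  | cons x t ih =>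
    simp only [List.foldl_cons]
    split
    · exact le_trans (by omega) (ih _)
    · exact ih st

-- the fold ends with count ≤ 1 iff every element of the tail is within 2r of the head
theorem acFold_le_one (t : List Int) (r a : Int) :
    ((t.foldl
      (fun (st : Int × Int) x => if x - st.2 > 2 * r then (st.1 + 1, x) else st) (1, a)).1 ≤ 1)
    ↔ (∀ x ∈ t, x - a ≤ 2 * r) := by
  induction t generalizing a with
  | nil => simp
  | cons x t ih =>
    simp only [List.foldl_cons, List.mem_cons]
    by_cases hx : x - a > 2 * r
    · simp only [if_pos hx]
      constructor
      · intro h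
        exact absurd (le_trans (acFold_mono t r (2, x)) h) (by omega)
      · intro h; exact absurd (h x (Or.inl rfl)) (by omega)
    · simp only [if_neg hx]
      rw [ih a]
      constructor
      · rintro h y (rfl | hy)
        · omega
        · exact h y hy
      · intro h y hy; exact h y (Or.inr hy)

-- every element of a ≤-pairwise list is at most its last element
theorem pairwise_le_getLast (l : List Int) (hp : l.Pairwise (· ≤ ·)) (x : Int)
    (hx : x ∈ l) (hne : l ≠ []) : x ≤ l.getLast hne := by
  induction l with
  | nil => exact absurd rfl hne
  | cons a t ih =>
    cases t with
    | nil => simp_all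
    | cons b t' =>
      rw [List.getLast_cons (by simp)]
      rcases List.mem_cons.mp hx with rfl | hx'
      · have hlm : (b :: t').getLast (by simp) ∈ b :: t' := List.getLast_mem _
        exact List.rel_of_pairwise_cons hp hlm
      · exact ih hp.tail hx' (by simp)

-- characterisation of can_explode_all on a sorted nonempty list, for r ≥ 0
theorem acCheck_iff (a : Int) (t : List Int) (hp : (a :: t).Pairwise (· ≤ ·)) (r : Int)
    (hr : 0 ≤ r) :
    acCheck (a :: t) r = true ↔ (a :: t).getLast (by simp) - a ≤ 2 * r := by
  unfold acCheck
  rw [PySem.List.pyGetD_zero_cons a t 0]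
  rw [PySem.List.foldl_pyRange_pyGetD' (a :: t) 0
       (fun (st : Int × Int) x => if x - st.2 > 2 * r then (st.1 + 1, x) else st) (1, a)
       (by omega : (0:Int) ≤ 1)]
  simp only [Int.toNat_one, List.drop_one, List.tail_cons, decide_eq_true_eq]
  rw [acFold_le_one t r a]
  constructor
  · intro h
    rcases List.eq_nil_or_concat t with rfl | ⟨t', y, rfl⟩
    · simp; omega
    · simp only [List.concat_eq_append] at h ⊢
      have hy : (a :: (t' ++ [y])).getLast (by simp) = y := by
        show ((a :: t') ++ [y]).getLast (by simp) = y
        exact List.getLast_append_singleton _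
      rw [hy]
      have := h y (by simp)
      omega
  · intro h x hx
    have hle : x ≤ (a :: t).getLast (by simp) :=
      pairwise_le_getLast _ hp x (List.mem_cons_of_mem a hx) (by simp)
    omega

-- binary search over a monotone predicate returns the least admissible value
theorem acLoop_eq (s : List Int) (ans : Int)
    (hc : ∀ r, 0 ≤ r → (acCheck s r = true ↔ ans ≤ r)) :
    ∀ fuel left right, (right - left).toNat < fuel → 0 ≤ left → left ≤ ans → ans ≤ right →
      acLoop s fuel left right = ans := by
  intro fuel
  induction fuel with
  | zero => intro left right hN; omega
  | succ N ih =>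
    intro left right hN h0 h1 h2
    rw [acLoop]
    by_cases h : left < right
    · rw [if_pos h]
      have h2' : PySem.Int.floordiv (right - left) 2 = (right - left) / 2 :=
        PySem.Int.floordiv_eq_ediv_of_pos (by omega)
      set mid := left + PySem.Int.floordiv (right - left) 2 with hmid
      have hbounds : left ≤ mid ∧ mid < right := by rw [hmid, h2']; omega
      by_cases hchk : acCheck s mid = true
      · rw [if_pos hchk]
        have hans : ans ≤ mid := (hc mid (by omega)).mp hchk
        exact ih left mid (by omega) h0 h1 hans
      · rw [if_neg hchk]
        have hans : mid < ans := by
          by_contra hcon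
          exact hchk ((hc mid (by omega)).mpr (by omega))
        exact ih (mid + 1) right (by omega) (by omega) (by omega) h2
    · rw [if_neg h]; omega

-- the last element of a ≤-sorted permutation is Python's max(xs)
theorem max_eq_getLast (h : List Int) (s : List Int) (hperm : s.Perm h)
    (hp : s.Pairwise (· ≤ ·)) (hne : s ≠ []) :
    (PySem.List.max? h (fun x => x)).getD 0 = s.getLast hne := by
  have hne' : h ≠ [] := by
    intro heq; subst heq; exact hne (List.Perm.eq_nil hperm)
  obtain ⟨m, hm⟩ : ∃ m, PySem.List.max? h (fun x => x) = some m := by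
    cases hh : PySem.List.max? h (fun x => x) with
    | none => exact absurd ((PySem.List.max?_eq_none_iff h (fun x => x)).mp hh) hne'
    | some m => exact ⟨m, rfl⟩
  rw [hm, Option.getD_some]
  have hismax : ∀ y ∈ h, y ≤ m := PySem.List.max?_isMax hm
  have h1 : s.getLast hne ≤ m := hismax _ (hperm.mem_iff.mp (List.getLast_mem hne))
  have h2 : m ≤ s.getLast hne :=
    pairwise_le_getLast s hp m (hperm.mem_iff.mpr (PySem.List.max?_mem hm)) hne
  omega

-- the head of a ≤-sorted permutation is Python's min(xs)
theorem min_eq_head (h : List Int) (a : Int) (t : List Int) (hperm : (a :: t).Perm h)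
    (hp : (a :: t).Pairwise (· ≤ ·)) :
    (PySem.List.min? h (fun x => x)).getD 0 = a := by
  have hne' : h ≠ [] := by
    intro heq; subst heq; simp at hperm
  obtain ⟨m, hm⟩ : ∃ m, PySem.List.min? h (fun x => x) = some m := by
    cases hh : PySem.List.min? h (fun x => x) with
    | none => exact absurd ((PySem.List.min?_eq_none_iff h (fun x => x)).mp hh) hne'
    | some m => exact ⟨m, rfl⟩
  rw [hm, Option.getD_some]
  have hismin : ∀ y ∈ h, m ≤ y := PySem.List.min?_isMin hm
  have h1 : m ≤ a := hismin a (hperm.mem_iff.mp List.mem_cons_self)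
  have h2 : a ≤ m := by
    rcases List.mem_cons.mp (hperm.mem_iff.mpr (PySem.List.min?_mem hm)) with rfl | hms
    · omega
    · exact List.rel_of_pairwise_cons hp hms
  omega

-- ===== VERDICT (by name: the statement is the Claim_ definition above) =====
theorem angry_cows_spec : Claim_equal_angry_cows := by
  intro haybales _ hpre
  unfold Spec_angry_cows angry_cows angry_cows_alt
  have hperm := PySem.List.sorted_perm haybales (fun x => x) false
  have hp : (PySem.List.sorted haybales (fun x => x) false).Pairwise (· ≤ ·) := by
    have := PySem.List.sorted_pairwise haybales (fun x => x)
    simpa using this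
  have hsne : PySem.List.sorted haybales (fun x => x) false ≠ [] := by
    intro heq
    exact hpre ((PySem.List.sorted_eq_nil_iff haybales (fun x => x) false).mp heq)
  obtain ⟨a, t, heq⟩ : ∃ a t, PySem.List.sorted haybales (fun x => x) false = a :: t := by
    cases hcase : PySem.List.sorted haybales (fun x => x) false with
    | nil => exact absurd hcase hsne
    | cons a t => exact ⟨a, t, rfl⟩
  rw [heq] at hperm hp
  simp only [heq]
  rw [PySem.List.pyGetD_neg_one (xs := a :: t) (d := 0) (by simp), PySem.List.pyGetD_zero_cons a t 0]
  set L := (a :: t).getLast (by simp) with hL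
  have hspan : a ≤ L := pairwise_le_getLast _ hp a List.mem_cons_self (by simp)
  have hdiv2 : PySem.Int.floordiv (L - a + 1) 2 = (L - a + 1) / 2 :=
    PySem.Int.floordiv_eq_ediv_of_pos (by omega)
  have hcheck : ∀ r, 0 ≤ r → (acCheck (a :: t) r = true ↔ (L - a + 1) / 2 ≤ r) := by
    intro r hr
    rw [acCheck_iff a t hp r hr, ← hL]
    omega
  rw [acLoop_eq (a :: t) ((L - a + 1) / 2) hcheck ((L - a - 0).toNat + 1) 0 (L - a)
      (by omega) (by omega) (by omega) (by omega)]
  rw [max_eq_getLast haybales (a :: t) hperm hp (by simp),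
      min_eq_head haybales a t hperm hp, ← hL, hdiv2]
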